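-- pv_equiv track=rewrite | github.com/pypi-data/pypi-mirror-404 | packages/dbn-cache/dbn_cache-1.2.3-py3-none-any.whl/dbn_cache/futures.py | _previous_quarterly_month
-- ===== SOURCE A (Python) =====
-- QUARTERLY_MONTHS = (3, 6, 9, 12)  # H, M, U, Z
--
-- def _previous_quarterly_month(month: int, year: int) -> tuple[int, int]:
--     """Get the previous quarterly contract month.
--
--     Quarterly months are March (H), June (M), September (U), December (Z).
--
--     Args:
--         month: Current contract month (1-12)
--         year: Current contract year
--
--     Returns:
--         Tuple of (previous_month, previous_year)
--
--     Example:
--         >>> _previous_quarterly_month(3, 2025)  # H25 -> Z24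
--         (12, 2024)
--         >>> _previous_quarterly_month(6, 2025)  # M25 -> H25
--         (3, 2025)
--     """
--     # Find the previous quarterly month
--     quarter_months = list(QUARTERLY_MONTHS)
--     if month in quarter_months:
--         idx = quarter_months.index(month)
--         if idx == 0:
--             # March -> previous December
--             return 12, year - 1
--         else:
--             return quarter_months[idx - 1], year
--     else:
--         # Non-quarterly month: find the most recent quarterly month before it
--         for q in reversed(quarter_months):
--             if q < month:
--                 return q, year
--         # If month is before March, previous is December of last year
--         return 12, year - 1
-- ===== SOURCE B (Python) =====
-- def _previous_quarterly_month(month: int, year: int) -> tuple[int, int]: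
--     """Closed-form previous quarterly month via integer division (no list scan)."""
--     prev = 3 * ((month - 1) // 3)
--     if prev <= 0:
--         return 12, year - 1
--     return min(prev, 12), year
-- ===== Notes on version B (the rewrite author's own statement) =====
-- stated objective: simpler
-- what changed: Replaced the list-membership/index search and reversed scan over QUARTERLY_MONTHS with a closed-form arithmetic computation: prev = 3*((month-1)//3), wrapping to (12, year-1) when prev <= 0 and clamping to 12 otherwise.
import Mathlib
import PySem

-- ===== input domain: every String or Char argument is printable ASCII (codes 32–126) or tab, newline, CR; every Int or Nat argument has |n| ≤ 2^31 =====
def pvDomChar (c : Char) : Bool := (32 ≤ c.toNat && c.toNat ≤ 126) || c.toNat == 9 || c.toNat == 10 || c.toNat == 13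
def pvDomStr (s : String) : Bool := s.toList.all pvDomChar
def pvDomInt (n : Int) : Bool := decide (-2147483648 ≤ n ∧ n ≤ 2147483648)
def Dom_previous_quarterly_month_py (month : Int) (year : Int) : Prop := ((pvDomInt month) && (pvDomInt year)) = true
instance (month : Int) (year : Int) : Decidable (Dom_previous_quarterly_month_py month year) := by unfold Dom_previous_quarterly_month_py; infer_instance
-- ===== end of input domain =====

-- B replaces A's list scans with a closed-form integer-division formula (objective: simpler).

-- ===== PORT A =====
def previous_quarterly_month_py (month : Int) (year : Int) : Int × Int :=
  let quarter_months : List Int := [3, 6, 9, 12]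
  if quarter_months.contains month then
    match PySem.List.index? quarter_months month with
    | some idx =>
      if idx = 0 then (12, year - 1)
      else ((PySem.List.pyGet? quarter_months ((idx : Int) - 1)).getD 0, year)
    | none => (12, year - 1)  -- unreachable: the branch guard gives month ∈ quarter_months
  else
    -- 'for q in reversed(quarter_months): if q < month: return q, year' = first match in the reversed list
    match quarter_months.reverse.find? (fun q => decide (q < month)) with
    | some q => (q, year)
    | none => (12, year - 1)

-- ===== PORT B =====
def previous_quarterly_month_py_alt (month : Int) (year : Int) : Int × Int :=
  let prev := 3 * PySem.Int.floordiv (month - 1) 3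
  if prev ≤ 0 then (12, year - 1) else (min prev 12, year)

-- ===== PRECONDITION & SPEC =====
def Spec_previous_quarterly_month_py (month : Int) (year : Int) (out : Int × Int) : Prop := out = previous_quarterly_month_py_alt month year
instance (month : Int) (year : Int) (out : Int × Int) : Decidable (Spec_previous_quarterly_month_py month year out) := by unfold Spec_previous_quarterly_month_py; infer_instance

-- ===== CLAIM (what is proved, stated in full; the proofs are below) =====
def Claim_equal_previous_quarterly_month_py : Prop := ∀ (month : Int) (year : Int), Dom_previous_quarterly_month_py month year → Spec_previous_quarterly_month_py month year (previous_quarterly_month_py month year)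

-- ===== LEMMAS AND PROOFS =====
theorem pq_eq (month year : Int) :
    previous_quarterly_month_py month year = previous_quarterly_month_py_alt month year := by
  unfold previous_quarterly_month_py previous_quarterly_month_py_alt
  rw [show PySem.Int.floordiv (month - 1) 3 = (month - 1) / 3 from
    PySem.Int.floordiv_eq_ediv_of_pos (by norm_num)]
  by_cases h3 : month = 3
  · subst h3
    rfl
  by_cases h6 : month = 6
  · subst h6
    rfl
  by_cases h9 : month = 9
  · subst h9
    rfl
  by_cases h12 : month = 12
  · subst h12
    rfl
  · simp only [List.contains_cons, List.contains_nil, List.reverse_cons, List.reverse_nil,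
      List.nil_append, List.cons_append]
    have hc : (month == 3 || (month == 6 || (month == 9 || (month == 12 || false)))) = false := by
      simp [h3, h6, h9, h12]
    rw [hc]
    simp only [Bool.false_eq_true, if_false]
    have hne3 : month ≠ 3 := h3
    have hne6 : month ≠ 6 := h6
    have hne9 : month ≠ 9 := h9
    have hne12 : month ≠ 12 := h12
    by_cases hA : 12 < month
    · rw [List.find?_cons_of_pos (h := by simpa using hA)]
      have ha : 4 ≤ (month - 1) / 3 := by omega
      rw [if_neg (by omega)]
      simp only [Prod.mk.injEq]
      exact ⟨by omega, trivial⟩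
    · rw [List.find?_cons_of_neg (h := by simpa using hA)]
      by_cases hB : 9 < month
      · rw [List.find?_cons_of_pos (h := by simpa using hB)]
        have ha : (month - 1) / 3 = 3 := by omega
        rw [if_neg (by omega)]
        simp only [Prod.mk.injEq]
        exact ⟨by omega, trivial⟩
      · rw [List.find?_cons_of_neg (h := by simpa using hB)]
        by_cases hC : 6 < month
        · rw [List.find?_cons_of_pos (h := by simpa using hC)]
          have ha : (month - 1) / 3 = 2 := by omega
          rw [if_neg (by omega)]
          simp only [Prod.mk.injEq]
          exact ⟨by omega, trivial⟩
        · rw [List.find?_cons_of_neg (h := by simpa using hC)]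
          by_cases hD : 3 < month
          · rw [List.find?_cons_of_pos (h := by simpa using hD)]
            have ha : (month - 1) / 3 = 1 := by omega
            rw [if_neg (by omega)]
            simp only [Prod.mk.injEq]
            exact ⟨by omega, trivial⟩
          · rw [List.find?_cons_of_neg (h := by simpa using hD), List.find?_nil]
            have ha : (month - 1) / 3 ≤ 0 := by omega
            rw [if_pos (by omega)]

-- ===== VERDICT (by name: the statement is the Claim_ definition above) =====
theorem previous_quarterly_month_py_spec : Claim_equal_previous_quarterly_month_py := by
  intro month year _
  unfold Spec_previous_quarterly_month_py
  exact pq_eq month year
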